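-- pv_equiv track=rewrite | github.com/Tony-sama/pylfit | tests/examples/sequences_learning/sequence_properties.py | chain_succession
-- ===== SOURCE A (Python) =====
-- def chain_response(events, sequence):
--     features = []
--     values = []
--     for ei in sorted(events):
--         for ej in sorted(events):
--             if(ei == ej):
--                 continue
--             features.append("chain_response_"+str(ei)+"_"+str(ej))
--
--             value = True
--             for i, e in enumerate(sequence):
--                 if(e == ei and (i >= len(sequence)-1 or sequence[i+1] != ej)):
--                     value = False
--                     break
--             values.append(value)
--     return features, values
--
-- def chain_precedence(events, sequence):
--     features = []
--     values = []
--     for ei in sorted(events):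
--         for ej in sorted(events):
--             if(ei == ej):
--                 continue
--             features.append("chain_precedence_"+str(ei)+"_"+str(ej))
--
--             value = True
--             r_sequence = sequence.copy()
--             r_sequence.reverse()
--             for i, e in enumerate(r_sequence):
--                 if(e == ej and (i >= len(r_sequence)-1 or r_sequence[i+1] != ei)):
--                     value = False
--                     break
--             values.append(value)
--     return features, values
--
-- def chain_succession(events, sequence):
--     features = []
--     values = []
--     for ei in sorted(events):
--         for ej in sorted(events):
--             if(ei == ej):
--                 continue
--             features.append("chain_succession_"+str(ei)+"_"+str(ej))
--
--     values = [a and b for a, b in zip(chain_response(events, sequence)[1], chain_precedence(events, sequence)[1])]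
--     return features, values
-- ===== SOURCE B (Python) =====
-- def _follow(sequence):
--     # one pass: nxt[e] = the unique immediate successor of every occurrence of e,
--     # or None if e has no such unique successor (conflict, or an occurrence at the end)
--     nxt = {}
--     n = len(sequence)
--     for i, e in enumerate(sequence):
--         s = sequence[i + 1] if i + 1 < n else None
--         if e in nxt:
--             if nxt[e] != s:
--                 nxt[e] = None
--         else:
--             nxt[e] = s
--     return nxt
--
-- def chain_succession(events, sequence):
--     es = sorted(events)
--     succ = _follow(sequence)
--     pred = _follow(sequence[::-1])
--     features = []
--     values = []
--     for ei in es: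
--         for ej in es:
--             if ei == ej:
--                 continue
--             features.append("chain_succession_" + str(ei) + "_" + str(ej))
--             resp = ei not in succ or succ[ei] == ej
--             prec = ej not in pred or pred[ej] == ei
--             values.append(resp and prec)
--     return features, values
-- ===== Notes on version B (the rewrite author's own statement) =====
-- stated objective: faster
-- what changed: Replaces the per-pair O(N) sequence scans (via chain_response/chain_precedence) with two one-pass dicts recording each event's unique immediate successor (on the sequence and on its reverse), answering every pair by O(1) lookups.
import Mathlib
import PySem

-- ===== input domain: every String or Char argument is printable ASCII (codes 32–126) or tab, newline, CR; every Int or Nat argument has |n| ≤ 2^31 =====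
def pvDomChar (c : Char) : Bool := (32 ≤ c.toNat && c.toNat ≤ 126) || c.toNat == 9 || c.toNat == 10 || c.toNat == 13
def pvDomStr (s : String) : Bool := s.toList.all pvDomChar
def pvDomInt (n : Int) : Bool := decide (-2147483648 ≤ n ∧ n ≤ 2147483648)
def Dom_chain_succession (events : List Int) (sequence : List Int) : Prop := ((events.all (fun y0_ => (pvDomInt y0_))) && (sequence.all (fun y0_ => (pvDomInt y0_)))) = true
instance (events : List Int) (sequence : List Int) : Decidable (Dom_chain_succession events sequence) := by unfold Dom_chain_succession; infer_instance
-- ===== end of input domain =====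

-- B replaces A's per-pair O(N) scans with two one-pass successor dicts (sequence and its reverse); pairs are answered by O(1) lookups.

-- ===== PORT A =====
-- inner loop of chain_response: 'for i, e in enumerate(sequence): if e == ei and (i >= len-1 or sequence[i+1] != ej): value = False; break'
-- ported as structural recursion with one-element lookahead (sequence[i+1] is the next list element; i >= len-1 is the singleton case)
def crCheck (ei ej : Int) : List Int → Bool
  | [] => true
  | [x] => !(x == ei)
  | x :: y :: rest => if x == ei && !(y == ej) then false else crCheck ei ej (y :: rest)

def chain_response (events : List Int) (sequence : List Int) : List String × List Bool :=
  (PySem.List.sorted events (fun x => x) false).foldl (fun acc ei =>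
    (PySem.List.sorted events (fun x => x) false).foldl (fun acc2 ej =>
      if ei == ej then acc2
      else (acc2.1 ++ ["chain_response_" ++ PySem.Int.toStr ei ++ "_" ++ PySem.Int.toStr ej],
            acc2.2 ++ [crCheck ei ej sequence])) acc) ([], [])

-- inner loop of chain_precedence over the reversed copy: 'if e == ej and (i >= len-1 or r_sequence[i+1] != ei)'
def cpCheck (ei ej : Int) : List Int → Bool
  | [] => true
  | [x] => !(x == ej)
  | x :: y :: rest => if x == ej && !(y == ei) then false else cpCheck ei ej (y :: rest)

def chain_precedence (events : List Int) (sequence : List Int) : List String × List Bool :=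
  (PySem.List.sorted events (fun x => x) false).foldl (fun acc ei =>
    (PySem.List.sorted events (fun x => x) false).foldl (fun acc2 ej =>
      if ei == ej then acc2
      else (acc2.1 ++ ["chain_precedence_" ++ PySem.Int.toStr ei ++ "_" ++ PySem.Int.toStr ej],
            -- r_sequence = sequence.copy(); r_sequence.reverse()
            acc2.2 ++ [cpCheck ei ej sequence.reverse])) acc) ([], [])

def chain_succession (events : List Int) (sequence : List Int) : List String × List Bool :=
  let features := (PySem.List.sorted events (fun x => x) false).foldl (fun acc ei =>
    (PySem.List.sorted events (fun x => x) false).foldl (fun acc2 ej =>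
      if ei == ej then acc2
      else acc2 ++ ["chain_succession_" ++ PySem.Int.toStr ei ++ "_" ++ PySem.Int.toStr ej]) acc) []
  -- zip truncates; both value lists have the same length
  let values := List.zipWith (fun a b => a && b) (chain_response events sequence).2 (chain_precedence events sequence).2
  (features, values)

-- ===== PORT B =====
-- _follow: one pass; nxt[e] = unique immediate successor of e, or none on conflict / end-of-sequence occurrence.
-- 's = sequence[i+1] if i+1 < n else None' is the head? of the remaining tail.
def buildFollow (d : PySem.Dict Int (Option Int)) : List Int → PySem.Dict Int (Option Int)
  | [] => d
  | x :: rest =>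
    let s : Option Int := rest.head?
    match d.get? x with
    | some v => buildFollow (if v == s then d else d.insert x none) rest
    | none => buildFollow (d.insert x s) rest

-- 'k not in d or d[k] == t'
def lookupOk (d : PySem.Dict Int (Option Int)) (k : Int) (t : Int) : Bool :=
  match d.get? k with | none => true | some v => v == some t

def chain_succession_alt (events : List Int) (sequence : List Int) : List String × List Bool :=
  let es := PySem.List.sorted events (fun x => x) false
  let succ := buildFollow PySem.Dict.empty sequence
  let pred := buildFollow PySem.Dict.empty ((PySem.List.slice? sequence none none (-1)).getD [])  -- sequence[::-1]
  es.foldl (fun acc ei =>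
    es.foldl (fun acc2 ej =>
      if ei == ej then acc2
      else
        -- resp = ei not in succ or succ[ei] == ej ; prec = ej not in pred or pred[ej] == ei
        let resp := lookupOk succ ei ej
        let prec := lookupOk pred ej ei
        (acc2.1 ++ ["chain_succession_" ++ PySem.Int.toStr ei ++ "_" ++ PySem.Int.toStr ej],
         acc2.2 ++ [resp && prec])) acc) ([], [])

-- ===== PRECONDITION & SPEC =====
def Spec_chain_succession (events : List Int) (sequence : List Int) (out : List String × List Bool) : Prop := out = chain_succession_alt events sequence
instance (events : List Int) (sequence : List Int) (out : List String × List Bool) : Decidable (Spec_chain_succession events sequence out) := by unfold Spec_chain_succession; infer_instance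

-- ===== CLAIM (what is proved, stated in full; the proofs are below) =====
def Claim_equal_chain_succession : Prop := ∀ (events : List Int) (sequence : List Int), Dom_chain_succession events sequence → Spec_chain_succession events sequence (chain_succession events sequence)

-- ===== LEMMAS AND PROOFS =====

-- all ordered pairs (ei, ej), ei ≠ ej, of the sorted event list — the common iteration of both programs
def pvPairs (es : List Int) : List (Int × Int) :=
  es.flatMap (fun ei => (es.filter (fun ej => !(ei == ej))).map (fun ej => (ei, ej)))

-- merged successor value of ei after scanning l, starting from acc (the dict entry so far)
def mergeS (ei : Int) (acc : Option (Option Int)) : List Int → Option (Option Int)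
  | [] => acc
  | x :: rest =>
      mergeS ei (if x == ei then
                   some (match acc with
                         | none => rest.head?
                         | some v => if v == rest.head? then v else none)
                 else acc) rest

def lookR (ej : Int) (o : Option (Option Int)) : Bool :=
  match o with | none => true | some v => v == some ej

theorem buildFollow_get? (l : List Int) (d : PySem.Dict Int (Option Int)) (ei : Int) :
    (buildFollow d l).get? ei = mergeS ei (d.get? ei) l := by
  induction l generalizing d with
  | nil => rfl
  | cons x rest ih =>
    by_cases hx : x = ei
    · subst hx
      cases hv : d.get? x with
      | none =>
        simp only [buildFollow, hv, mergeS, beq_self_eq_true, if_pos]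
        rw [ih, PySem.Dict.get?_insert_self]
      | some v =>
        by_cases hvs : v = rest.head?
        · simp [buildFollow, hv, hvs, mergeS, ih]
        · simp only [buildFollow, hv, mergeS, beq_self_eq_true, if_pos,
            beq_iff_eq, hvs, if_neg, not_false_iff]
          rw [ih, PySem.Dict.get?_insert_self]
    · have hne : ei ≠ x := fun h => hx h.symm
      cases hv : d.get? x with
      | none =>
        simp only [buildFollow, hv, mergeS, beq_iff_eq, hx, if_neg, not_false_iff]
        rw [ih, PySem.Dict.get?_insert_of_ne _ _ hne]
      | some v =>
        by_cases hvs : v = rest.head?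
        · simp [buildFollow, hv, hvs, mergeS, ih, hx]
        · simp only [buildFollow, hv, mergeS, beq_iff_eq, hx, if_neg, not_false_iff]
          rw [ih, if_neg hvs, PySem.Dict.get?_insert_of_ne _ _ hne]

theorem lookR_mergeS (ei ej : Int) (l : List Int) (acc : Option (Option Int)) :
    lookR ej (mergeS ei acc l) = (lookR ej acc && crCheck ei ej l) := by
  induction l generalizing acc with
  | nil => simp [mergeS, crCheck]
  | cons x rest ih =>
    cases rest with
    | nil =>
      by_cases hx : x = ei
      · cases acc with
        | none => simp [mergeS, crCheck, hx, lookR]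
        | some v => cases v <;> simp [mergeS, crCheck, hx, lookR]
      · simp [mergeS, crCheck, hx, lookR]
    | cons y rest' =>
      rw [show mergeS ei acc (x :: y :: rest') = mergeS ei
        (if x == ei then
           some (match acc with
                 | none => (y :: rest').head?
                 | some v => if v == (y :: rest').head? then v else none)
         else acc) (y :: rest') from rfl, ih]
      by_cases hx : x = ei
      · by_cases hy : y = ej
        · subst hy
          cases acc with
          | none => simp [crCheck, hx, lookR]
          | some v =>
            simp only [crCheck, hx, List.head?, beq_self_eq_true, Bool.not_true,
              Bool.and_false, if_pos, if_neg, Bool.false_eq_true, not_false_iff]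
            by_cases hv : v = some y
            · simp [hv, lookR]
            · simp [lookR, hv]
        · have hcr : crCheck ei ej (x :: y :: rest') = false := by
            simp [crCheck, hx, hy]
          rw [hcr]
          cases acc with
          | none => simp [lookR, hx, List.head?, hy]
          | some v =>
            by_cases hv : v = some y
            · simp [lookR, hx, List.head?, hv, hy]
            · simp [lookR, hx, List.head?, if_neg (by simpa using hv)]
      · simp [crCheck, hx, lookR]

theorem cpCheck_eq_crCheck (ei ej : Int) (l : List Int) : cpCheck ei ej l = crCheck ej ei l := by
  induction l with
  | nil => rfl
  | cons x rest ih =>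
    cases rest with
    | nil => rfl
    | cons y rest' => simp only [cpCheck, crCheck, ih]

-- shape of the inner loop appending one string per ej ≠ ei
theorem innerFold_single (l : List Int) (ei : Int) (g : Int → Int → String) (acc : List String) :
    l.foldl (fun a2 ej => if ei == ej then a2 else a2 ++ [g ei ej]) acc
      = acc ++ (l.filter (fun ej => !(ei == ej))).map (g ei) := by
  have h : (fun (a2 : List String) ej => if ei == ej then a2 else a2 ++ [g ei ej])
      = (fun a2 ej => if (!(ei == ej)) then a2 ++ [g ei ej] else a2) := by
    funext a2 ej; cases he : ei == ej <;> simp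
  rw [h, PySem.List.foldl_append_if]

-- shape of the inner loop appending a string and a bool per ej ≠ ei
theorem innerFold_pair (l : List Int) (ei : Int) (g : Int → Int → String) (f : Int → Int → Bool)
    (acc : List String × List Bool) :
    l.foldl (fun a2 ej => if ei == ej then a2 else (a2.1 ++ [g ei ej], a2.2 ++ [f ei ej])) acc
      = (acc.1 ++ (l.filter (fun ej => !(ei == ej))).map (g ei),
         acc.2 ++ (l.filter (fun ej => !(ei == ej))).map (f ei)) := by
  have h : (fun (a2 : List String × List Bool) ej =>
        if ei == ej then a2 else (a2.1 ++ [g ei ej], a2.2 ++ [f ei ej]))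
      = (fun a2 ej => ((if ei == ej then a2.1 else a2.1 ++ [g ei ej]),
                       (if ei == ej then a2.2 else a2.2 ++ [f ei ej]))) := by
    funext a2 ej; cases he : ei == ej <;> simp
  have h1 : (fun (a1 : List String) ej => if ei == ej then a1 else a1 ++ [g ei ej])
      = (fun a1 ej => if (!(ei == ej)) then a1 ++ [g ei ej] else a1) := by
    funext a1 ej; cases he : ei == ej <;> simp
  have h2 : (fun (a2 : List Bool) ej => if ei == ej then a2 else a2 ++ [f ei ej])
      = (fun a2 ej => if (!(ei == ej)) then a2 ++ [f ei ej] else a2) := by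
    funext a2 ej; cases he : ei == ej <;> simp
  obtain ⟨aF, aV⟩ := acc
  rw [h, PySem.List.foldl_prod_mk
        (f := fun a1 ej => if ei == ej then a1 else a1 ++ [g ei ej])
        (g := fun a2 ej => if ei == ej then a2 else a2 ++ [f ei ej]),
      h1, h2, PySem.List.foldl_append_if, PySem.List.foldl_append_if]

-- the whole double loop, inner list fixed to L
theorem doubleFold_pair (es L : List Int) (g : Int → Int → String) (f : Int → Int → Bool)
    (acc : List String × List Bool) :
    es.foldl (fun acc ei =>
      L.foldl (fun a2 ej =>
        if ei == ej then a2 else (a2.1 ++ [g ei ej], a2.2 ++ [f ei ej])) acc) acc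
    = (acc.1 ++ (es.flatMap (fun ei => (L.filter (fun ej => !(ei == ej))).map (g ei))),
       acc.2 ++ (es.flatMap (fun ei => (L.filter (fun ej => !(ei == ej))).map (f ei)))) := by
  induction es generalizing acc with
  | nil => simp
  | cons e tail ih =>
    rw [List.foldl_cons, innerFold_pair, ih]
    simp [List.flatMap_cons]

theorem doubleFold_single (es L : List Int) (g : Int → Int → String) (acc : List String) :
    es.foldl (fun acc ei =>
      L.foldl (fun a2 ej => if ei == ej then a2 else a2 ++ [g ei ej]) acc) acc
    = acc ++ (es.flatMap (fun ei => (L.filter (fun ej => !(ei == ej))).map (g ei))) := by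
  induction es generalizing acc with
  | nil => simp
  | cons e tail ih =>
    rw [List.foldl_cons, innerFold_single, ih, List.flatMap_cons, List.append_assoc]

theorem zipWith_and_map {α : Type} (l : List α) (f g : α → Bool) :
    List.zipWith (fun a b => a && b) (l.map f) (l.map g) = l.map (fun x => f x && g x) := by
  induction l with
  | nil => rfl
  | cons x rest ih => simp [ih]

-- pointwise agreement: crCheck is the succ-dict lookup, cpCheck on the reverse is the pred-dict lookup
-- pointwise agreement: crCheck is the succ-dict lookup
theorem crCheck_eq_look (ei ej : Int) (sq : List Int) :
    lookupOk (buildFollow PySem.Dict.empty sq) ei ej = crCheck ei ej sq := by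
  have h : lookupOk (buildFollow PySem.Dict.empty sq) ei ej
      = lookR ej ((buildFollow PySem.Dict.empty sq).get? ei) := rfl
  rw [h, buildFollow_get?, PySem.Dict.get?_empty, lookR_mergeS]
  simp [lookR]

theorem resp_eq (events sequence : List Int) :
    (chain_response events sequence).2
      = ((PySem.List.sorted events (fun x => x) false).flatMap (fun ei =>
          (((PySem.List.sorted events (fun x => x) false).filter (fun ej => !(ei == ej))).map
            (fun ej => crCheck ei ej sequence)))) := by
  unfold chain_response
  rw [doubleFold_pair]
  simp

theorem prec_eq (events sequence : List Int) :
    (chain_precedence events sequence).2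
      = ((PySem.List.sorted events (fun x => x) false).flatMap (fun ei =>
          (((PySem.List.sorted events (fun x => x) false).filter (fun ej => !(ei == ej))).map
            (fun ej => cpCheck ei ej sequence.reverse)))) := by
  unfold chain_precedence
  rw [doubleFold_pair]
  simp

theorem alt_eq (events sequence : List Int) :
    chain_succession_alt events sequence
      = (((PySem.List.sorted events (fun x => x) false).flatMap (fun ei =>
            (((PySem.List.sorted events (fun x => x) false).filter (fun ej => !(ei == ej))).map
              (fun ej => "chain_succession_" ++ PySem.Int.toStr ei ++ "_" ++ PySem.Int.toStr ej)))),
         ((PySem.List.sorted events (fun x => x) false).flatMap (fun ei =>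
            (((PySem.List.sorted events (fun x => x) false).filter (fun ej => !(ei == ej))).map
              (fun ej => lookupOk (buildFollow PySem.Dict.empty sequence) ei ej
                      && lookupOk (buildFollow PySem.Dict.empty sequence.reverse) ej ei))))) := by
  unfold chain_succession_alt
  rw [PySem.List.slice?_none_none_neg_one, Option.getD_some]
  rw [doubleFold_pair]
  simp

theorem flatMap_pairs {γ : Type} (es : List Int) (f : Int → Int → γ) :
    es.flatMap (fun ei => ((es.filter (fun ej => !(ei == ej))).map (fun ej => f ei ej)))
      = (pvPairs es).map (fun p => f p.1 p.2) := by
  simp [pvPairs, List.map_flatMap, List.map_map, Function.comp_def]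

theorem chain_succession_spec : Claim_equal_chain_succession := by
  intro events sequence _
  unfold Spec_chain_succession
  rw [alt_eq]
  unfold chain_succession
  simp only []
  rw [resp_eq, prec_eq, doubleFold_single, List.nil_append]
  simp only [Prod.mk.injEq]
  refine ⟨trivial, ?_⟩
  rw [flatMap_pairs, flatMap_pairs, flatMap_pairs, zipWith_and_map]
  refine List.map_congr_left (fun p _ => ?_)
  rw [cpCheck_eq_crCheck, crCheck_eq_look (sq := sequence), crCheck_eq_look (sq := sequence.reverse)]
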